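-- pv_equiv track=rewrite | github.com/Koyle1/DDG_experiments | 20-graph-embedding-gp/simplification.py | _split_embedding
-- ===== SOURCE A (Python) =====
-- def _split_embedding(expr: str):
--     parts = [p.strip() for p in expr.split(";") if p.strip()]
--     x_expr = None
--     y_expr = None
--     for part in parts:
--         if part.startswith("x="):
--             x_expr = part[2:].strip()
--         elif part.startswith("y="):
--             y_expr = part[2:].strip()
--     return x_expr, y_expr
-- ===== SOURCE B (Python) =====
-- def _split_embedding(expr: str):
--     # Generic parse: build a key->value table from 'k=v' segments, then look up x and y.
--     d = {}
--     for raw in expr.split(";"):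
--         part = raw.strip()
--         if not part:
--             continue
--         k, sep, v = part.partition("=")
--         if sep:
--             d[k] = v.strip()
--     return d.get("x"), d.get("y")
-- ===== Notes on version B (the rewrite author's own statement) =====
-- stated objective: idiomatic
-- what changed: Replaces the two hard-coded startswith/slice branches by a generic parse of every segment into a key/value pair via str.partition('=') stored in a dict, with the result obtained by d.get('x'), d.get('y') after the loop.
import Mathlib
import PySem

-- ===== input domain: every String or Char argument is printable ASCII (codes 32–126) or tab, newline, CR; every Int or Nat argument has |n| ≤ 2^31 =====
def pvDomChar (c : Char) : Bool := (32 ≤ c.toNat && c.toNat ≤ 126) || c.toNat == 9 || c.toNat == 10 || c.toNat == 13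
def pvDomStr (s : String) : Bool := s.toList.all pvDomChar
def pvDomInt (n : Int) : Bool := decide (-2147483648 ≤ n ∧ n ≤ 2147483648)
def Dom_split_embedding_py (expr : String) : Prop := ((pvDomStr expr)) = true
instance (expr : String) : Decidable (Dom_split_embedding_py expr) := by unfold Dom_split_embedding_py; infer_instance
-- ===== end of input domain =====

-- B replaces A's two hard-coded startswith/slice branches by a generic parse of each
-- segment into a key/value pair (str.partition('=')) stored in a dict, with the result
-- read off by d.get('x'), d.get('y') (objective: idiomatic; no speed claim).

-- ===== PORT A =====
-- the comprehension's filter-and-strip: p.strip() kept when truthy (nonempty)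
def pvKeep (p : List Char) : Option (List Char) :=
  if PySem.Chars.strip p = [] then none else some (PySem.Chars.strip p)

-- the body of A's for-loop (branch order as in the Python)
def pvStepA (st : Option String × Option String) (part : List Char) :
    Option String × Option String :=
  if PySem.Chars.startswith part ['x', '='] = true then
    (some (String.ofList (PySem.Chars.strip (PySem.List.slice part (some 2) none))), st.2)
  else if PySem.Chars.startswith part ['y', '='] = true then
    (st.1, some (String.ofList (PySem.Chars.strip (PySem.List.slice part (some 2) none))))
  else st

def split_embedding_py (expr : String) : Option String × Option String :=
  ((PySem.Chars.splitOn expr.toList [';']).filterMap pvKeep).foldl pvStepA (none, none)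

-- ===== PORT B =====
-- exact port of str.partition("="): (before first '=', '=' found?, after first '=')
def pvPartitionEq (cs : List Char) : List Char × Bool × List Char :=
  let k := cs.takeWhile (fun ch => ch != '=')
  match cs.dropWhile (fun ch => ch != '=') with
  | [] => (k, false, [])
  | _ :: v => (k, true, v)

-- the body of B's for-loop: strip, skip empty, partition, store k ↦ v.strip()
def pvStepB (d : PySem.Dict String String) (raw : List Char) : PySem.Dict String String :=
  let part := PySem.Chars.strip raw
  if part = [] then d
  else
    match pvPartitionEq part with
    | (k, sep, v) =>
      if sep then d.insert (String.ofList k) (String.ofList (PySem.Chars.strip v)) else d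

def split_embedding_py_alt (expr : String) : Option String × Option String :=
  let d := (PySem.Chars.splitOn expr.toList [';']).foldl pvStepB PySem.Dict.empty
  (d.get? "x", d.get? "y")

-- ===== PRECONDITION & SPEC =====
def Spec_split_embedding_py (expr : String) (out : Option String × Option String) : Prop := out = split_embedding_py_alt expr
instance (expr : String) (out : Option String × Option String) : Decidable (Spec_split_embedding_py expr out) := by unfold Spec_split_embedding_py; infer_instance

-- ===== CLAIM (what is proved, stated in full; the proofs are below) =====
def Claim_equal_split_embedding_py : Prop := ∀ (expr : String), Dom_split_embedding_py expr → Spec_split_embedding_py expr (split_embedding_py expr)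

-- ===== LEMMAS AND PROOFS =====

-- a partition whose key is the single char [c] means the segment starts with "c="
lemma pvPartition_key_single (c : Char) (cs v : List Char)
    (h : pvPartitionEq cs = ([c], true, v)) :
    PySem.Chars.startswith cs [c, '='] = true := by
  unfold pvPartitionEq at h
  rcases hd : cs.dropWhile (fun ch => ch != '=') with _ | ⟨e, rest⟩ <;> rw [hd] at h
  · simp at h
  · simp only [Prod.mk.injEq, true_and] at h
    obtain ⟨hk, hv⟩ := h
    have he : e = '=' := by
      have h0 := List.head?_dropWhile_not (fun ch => ch != '=') cs
      rw [hd] at h0; simpa using h0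
    have hcs : cs = c :: '=' :: rest := by
      conv_lhs => rw [← List.takeWhile_append_dropWhile (p := fun ch => ch != '=') (l := cs)]
      rw [hk, hd, he]; rfl
    rw [hcs, PySem.Chars.startswith_iff]
    exact ⟨rest, rfl⟩

-- a segment starting with "c=" (c ≠ '=') partitions as key [c], value the rest
lemma pvPartition_eval (c : Char) (hc : (c != '=') = true) (t : List Char) :
    pvPartitionEq (c :: '=' :: t) = ([c], true, t) := by
  simp [pvPartitionEq, hc]

-- one loop step: A's pair state tracks the "x"/"y" lookups of B's dict
lemma pvStep_rel (raw : List Char) (st : Option String × Option String)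
    (d : PySem.Dict String String)
    (h1 : st.1 = d.get? "x") (h2 : st.2 = d.get? "y")
    (hemp : ¬ PySem.Chars.strip raw = []) :
    (pvStepA st (PySem.Chars.strip raw)).1 = (pvStepB d raw).get? "x" ∧
    (pvStepA st (PySem.Chars.strip raw)).2 = (pvStepB d raw).get? "y" := by
  unfold pvStepA pvStepB
  rw [if_neg hemp]
  by_cases hx : PySem.Chars.startswith (PySem.Chars.strip raw) ['x', '='] = true
  · obtain ⟨t, ht⟩ := (PySem.Chars.startswith_iff _ _).1 hx
    rw [if_pos hx, ← ht]
    rw [show (['x', '='] ++ t : List Char) = 'x' :: '=' :: t from rfl]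
    rw [pvPartition_eval 'x' (by decide) t]
    simp only [if_true]
    rw [show PySem.List.slice ('x' :: '=' :: t) (some 2) none = t from by
      simp [PySem.List.slice]]
    refine ⟨?_, ?_⟩
    · rw [show String.ofList ['x'] = "x" from rfl, PySem.Dict.get?_insert_self]
    · rw [show String.ofList ['x'] = "x" from rfl,
        PySem.Dict.get?_insert_of_ne d _ (by decide : ("y" : String) ≠ "x")]
      exact h2
  · rw [if_neg hx]
    by_cases hy : PySem.Chars.startswith (PySem.Chars.strip raw) ['y', '='] = true
    · obtain ⟨t, ht⟩ := (PySem.Chars.startswith_iff _ _).1 hy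
      rw [if_pos hy, ← ht]
      rw [show (['y', '='] ++ t : List Char) = 'y' :: '=' :: t from rfl]
      rw [pvPartition_eval 'y' (by decide) t]
      simp only [if_true]
      rw [show PySem.List.slice ('y' :: '=' :: t) (some 2) none = t from by
        simp [PySem.List.slice]]
      refine ⟨?_, ?_⟩
      · rw [show String.ofList ['y'] = "y" from rfl,
          PySem.Dict.get?_insert_of_ne d _ (by decide : ("x" : String) ≠ "y")]
        exact h1
      · rw [show String.ofList ['y'] = "y" from rfl, PySem.Dict.get?_insert_self]
    · rw [if_neg hy]
      rcases hp : pvPartitionEq (PySem.Chars.strip raw) with ⟨k, sep, v⟩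
      cases sep
      · simpa using ⟨h1, h2⟩
      · rw [show (match ((k, true, v) : List Char × Bool × List Char) with
          | (k, sep, v) =>
            if sep = true then
              d.insert (String.ofList k) (String.ofList (PySem.Chars.strip v)) else d)
            = d.insert (String.ofList k) (String.ofList (PySem.Chars.strip v)) from rfl]
        have hkx : k ≠ ['x'] := by
          intro hk; subst hk
          exact hx (pvPartition_key_single 'x' _ v hp)
        have hky : k ≠ ['y'] := by
          intro hk; subst hk
          exact hy (pvPartition_key_single 'y' _ v hp)
        refine ⟨?_, ?_⟩
        · rw [PySem.Dict.get?_insert_of_ne d _ (by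
            intro he; apply hkx
            have := congrArg String.toList he; simpa using this.symm)]
          exact h1
        · rw [PySem.Dict.get?_insert_of_ne d _ (by
            intro he; apply hky
            have := congrArg String.toList he; simpa using this.symm)]
          exact h2

-- the loop invariant, over the whole segment list
lemma pvFold_invariant (l : List (List Char)) (st : Option String × Option String)
    (d : PySem.Dict String String)
    (h1 : st.1 = d.get? "x") (h2 : st.2 = d.get? "y") :
    ((l.filterMap pvKeep).foldl pvStepA st).1 = (l.foldl pvStepB d).get? "x" ∧
    ((l.filterMap pvKeep).foldl pvStepA st).2 = (l.foldl pvStepB d).get? "y" := by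
  induction l generalizing st d with
  | nil => exact ⟨h1, h2⟩
  | cons raw rest ih =>
    by_cases hemp : PySem.Chars.strip raw = []
    · have hA : (raw :: rest).filterMap pvKeep = rest.filterMap pvKeep := by
        simp [pvKeep, hemp]
      have hB : pvStepB d raw = d := by simp [pvStepB, hemp]
      rw [hA, List.foldl_cons, hB]
      exact ih st d h1 h2
    · have hA : (raw :: rest).filterMap pvKeep =
        PySem.Chars.strip raw :: rest.filterMap pvKeep := by
        simp [pvKeep, hemp]
      rw [hA, List.foldl_cons, List.foldl_cons]
      obtain ⟨g1, g2⟩ := pvStep_rel raw st d h1 h2 hemp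
      exact ih _ _ g1 g2

-- ===== VERDICT (by name: the statement is the Claim_ definition above) =====
theorem split_embedding_py_spec : Claim_equal_split_embedding_py := by
  intro expr _
  unfold Spec_split_embedding_py split_embedding_py split_embedding_py_alt
  obtain ⟨g1, g2⟩ := pvFold_invariant (PySem.Chars.splitOn expr.toList [';'])
    (none, none) PySem.Dict.empty (PySem.Dict.get?_empty "x").symm
    (PySem.Dict.get?_empty "y").symm
  exact Prod.ext g1 g2
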